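-- pv_equiv track=rewrite | github.com/NadiaAlmutlak/Intro-Python | Desktop/IntroPython/Midterm/Midterm Practice/Farro_Shuffle.py | faro_shuffle
-- ===== SOURCE A (Python) =====
-- def slice(d): #Function slices the deck in half
--     B, C = d[:int(len(d) / 2 )], d[int(len(d) / 2):]
--     return B,C
--
-- def weave(d,t):
--     B, C = slice(d) # Bring back the slicing function within the weaving function for future loops
--     if t == "out":
--         list=([a for b in zip(B, C) for a in b]) #performs an out shuffle
--         return list
--     if t=="in":
--         list=([a for b in zip(C,B) for a in b])#performs an in shuffle
--         return list
--     else: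
--         return "Shuffle can only be 'in' or 'out'! That's the point of a faro shuffle!"
--
-- def single_faro_shuffle(d,t): #function presents on complete faro shuffle
--     list = weave(d, t)
--     return list
--
-- def faro_shuffle(d,n,t): #function completes multiple faro shuffles
--     ps = d
--     if type(n)== int:
--         for i in range (n):
--             ps = single_faro_shuffle(ps,t)
--         return ps
--     else:
--         return "n must be an integer!"
-- ===== SOURCE B (Python) =====
-- # Faro shuffle as a permutation power: build the one-shuffle index map once,
-- # raise it to the n-th power by repeated squaring, index the deck once.
--
-- def _pow(p, s):
--     # index map of s >= 1 successive applications of the index map p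
--     if s <= 1:
--         return p
--     if s % 2 == 0:
--         h = _pow(p, s // 2)
--         return [h[j] for j in h]
--     h = _pow(p, s - 1)
--     return [h[j] for j in p]
--
-- def faro_shuffle(d, n, t):
--     if n <= 0:
--         return d  # zero shuffles: the deck is unchanged
--     if t not in ("in", "out"):
--         return "Shuffle can only be 'in' or 'out'! That's the point of a faro shuffle!"
--     k = len(d) // 2
--     if t == "out":
--         sigma = [j // 2 + (j % 2) * k for j in range(2 * k)]
--     else:
--         sigma = [j // 2 + (1 - j % 2) * k for j in range(2 * k)]
--     return [d[i] for i in _pow(sigma, n)]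
-- ===== Notes on version B (the rewrite author's own statement) =====
-- stated objective: faster
-- what changed: Instead of weaving the deck n times, B builds the single-shuffle index permutation once, raises it to the n-th power by squaring, and indexes the original deck once; Pre_ excludes shuffle types other than 'in'/'out' with n >= 1, where both programs return the module's error string (a str, not a list of ints).
import Mathlib
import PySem

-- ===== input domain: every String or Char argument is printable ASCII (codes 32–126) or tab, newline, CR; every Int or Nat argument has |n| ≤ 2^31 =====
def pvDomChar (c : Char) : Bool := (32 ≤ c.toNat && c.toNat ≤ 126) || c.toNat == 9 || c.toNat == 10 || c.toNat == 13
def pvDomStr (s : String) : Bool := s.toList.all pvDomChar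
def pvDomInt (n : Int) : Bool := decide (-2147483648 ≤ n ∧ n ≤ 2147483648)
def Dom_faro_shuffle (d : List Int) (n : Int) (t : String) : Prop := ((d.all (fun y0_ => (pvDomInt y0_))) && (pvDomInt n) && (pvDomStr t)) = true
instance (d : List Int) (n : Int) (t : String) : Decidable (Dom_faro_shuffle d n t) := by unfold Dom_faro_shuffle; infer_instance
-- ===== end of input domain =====

-- B changes the algorithm: one faro step is a fixed index permutation, so B composes that
-- permutation with itself by squaring and indexes the deck once (objective: faster in n).

-- ===== PORT A =====
-- Python's `slice` helper; `int(len(d) / 2)` = ⌊len/2⌋ since len(d) ≥ 0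
def sliceA (d : List Int) : List Int × List Int :=
  (PySem.List.slice d none (some ((d.length / 2 : Nat) : Int)),
   PySem.List.slice d (some ((d.length / 2 : Nat) : Int)) none)

def weaveA (d : List Int) (t : String) : List Int :=
  if t = "out" then ((sliceA d).1.zip (sliceA d).2).flatMap (fun p => [p.1, p.2])
  else if t = "in" then ((sliceA d).2.zip (sliceA d).1).flatMap (fun p => [p.1, p.2])
  else []  -- Python returns an error STRING here; unreachable under Pre_faro_shuffle

def faroLoopA : Nat → List Int → String → List Int
  | 0, ps, _ => ps
  | s + 1, ps, t => faroLoopA s (weaveA ps t) t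

-- `type(n) == int` is always true under the Int typing, so only the loop branch remains
def faro_shuffle (d : List Int) (n : Int) (t : String) : List Int :=
  faroLoopA n.toNat d t

-- ===== PORT B =====
-- the two sigma list comprehensions of Source B (j // 2 = j / 2)
def sigmaB (k : Nat) (t : String) : List Nat :=
  if t = "out" then (List.range (2 * k)).map (fun j => j / 2 + (j % 2) * k)
  else (List.range (2 * k)).map (fun j => j / 2 + (1 - j % 2) * k)

-- _pow of Source B; `[h[j] for j in q]`: the indices are always in range (proved below), so getD
def powB (p : List Nat) (s : Nat) : List Nat :=
  if s ≤ 1 then p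
  else if s % 2 = 0 then
    let h := powB p (s / 2)
    h.map (fun j => h.getD j 0)
  else
    let h := powB p (s - 1)
    p.map (fun j => h.getD j 0)
termination_by s
decreasing_by all_goals omega

def faro_shuffle_alt (d : List Int) (n : Int) (t : String) : List Int :=
  if n ≤ 0 then d
  else if ¬(t = "in" ∨ t = "out") then []  -- Python returns the module's error STRING; excluded by Pre_faro_shuffle
  else (powB (sigmaB (d.length / 2) t) n.toNat).map (fun i => d.getD i 0)

-- ===== PRECONDITION & SPEC =====
-- Pre_ excludes n ≥ 1 with a shuffle type other than "in"/"out": there both programs return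
-- the module's error string, which is not a value of type List Int.
def Pre_faro_shuffle (d : List Int) (n : Int) (t : String) : Prop :=
  n ≤ 0 ∨ t = "in" ∨ t = "out"
instance (d : List Int) (n : Int) (t : String) : Decidable (Pre_faro_shuffle d n t) := by
  unfold Pre_faro_shuffle; infer_instance

def pvWitness_faro_shuffle : List Int × Int × String := ([3, 1, 4, 1, 5, 9], 2, "out")

def Spec_faro_shuffle (d : List Int) (n : Int) (t : String) (out : List Int) : Prop := out = faro_shuffle_alt d n t
instance (d : List Int) (n : Int) (t : String) (out : List Int) : Decidable (Spec_faro_shuffle d n t out) := by unfold Spec_faro_shuffle; infer_instance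

-- ===== CLAIM (what is proved, stated in full; the proofs are below) =====
def Claim_equal_faro_shuffle : Prop := ∀ (d : List Int) (n : Int) (t : String), Dom_faro_shuffle d n t → Pre_faro_shuffle d n t → Spec_faro_shuffle d n t (faro_shuffle d n t)

-- ===== LEMMAS AND PROOFS =====

-- apply an index map to a deck (proof vocabulary for both ports' final maps)
def applyP (p : List Nat) (d : List Int) : List Int := p.map (fun i => d.getD i 0)

-- s-fold application of the single-shuffle index map
def iterW (q : List Nat) : Nat → List Int → List Int
  | 0, d => d
  | s + 1, d => applyP q (iterW q s d)

lemma applyP_length (p : List Nat) (d : List Int) : (applyP p d).length = p.length := by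
  simp [applyP]

lemma sigmaB_length (k : Nat) (t : String) : (sigmaB k t).length = 2 * k := by
  unfold sigmaB; split <;> simp

lemma sigmaB_mem (k : Nat) (t : String) (i : Nat) (h : i ∈ sigmaB k t) : i < 2 * k := by
  unfold sigmaB at h
  split at h <;>
    (simp at h; obtain ⟨j, hj, rfl⟩ := h;
     rcases Nat.mod_two_eq_zero_or_one j with h2 | h2 <;> rw [h2] <;> omega)

lemma applyP_comp (p q : List Nat) (d : List Int) (hq : ∀ j ∈ q, j < p.length) :
    applyP (q.map (fun j => p.getD j 0)) d = applyP q (applyP p d) := by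
  unfold applyP
  simp only [List.map_map]
  apply List.map_congr_left
  intro j hj
  have hjp : j < p.length := hq j hj
  simp only [Function.comp_apply]
  rw [List.getD_eq_getElem (p.map _) 0 (by simpa using hjp), List.getElem_map,
      List.getD_eq_getElem p 0 hjp]

lemma powB_inv (p : List Nat) (hp : ∀ i ∈ p, i < p.length) :
    ∀ s, (powB p s).length = p.length ∧ ∀ i ∈ powB p s, i < p.length := by
  intro s
  induction s using Nat.strong_induction_on with
  | _ s ih =>
    unfold powB
    split_ifs with h1 h2
    · exact ⟨rfl, hp⟩
    · obtain ⟨hlen, hmem⟩ := ih (s / 2) (by omega)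
      refine ⟨by simpa using hlen, ?_⟩
      intro i hi
      simp only [List.mem_map] at hi
      obtain ⟨j, hj, rfl⟩ := hi
      have : j < (powB p (s / 2)).length := hlen ▸ hmem j hj
      rw [List.getD_eq_getElem _ 0 this]
      exact hmem _ (List.getElem_mem this)
    · obtain ⟨hlen, hmem⟩ := ih (s - 1) (by omega)
      refine ⟨by simp, ?_⟩
      intro i hi
      simp only [List.mem_map] at hi
      obtain ⟨j, hj, rfl⟩ := hi
      have : j < (powB p (s - 1)).length := hlen ▸ hp j hj
      rw [List.getD_eq_getElem _ 0 this]
      exact hmem _ (List.getElem_mem this)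

lemma iterW_add (q : List Nat) (a b : Nat) (d : List Int) :
    iterW q (a + b) d = iterW q a (iterW q b d) := by
  induction a with
  | zero => simp [iterW]
  | succ a ih => rw [Nat.succ_add]; simp [iterW, ih]

lemma powB_correct (q : List Nat) (hq : ∀ i ∈ q, i < q.length) :
    ∀ s, 1 ≤ s → ∀ d, applyP (powB q s) d = iterW q s d := by
  intro s
  induction s using Nat.strong_induction_on with
  | _ s ih =>
    intro hs d
    obtain ⟨hlen, hmem⟩ := powB_inv q hq (s / 2)
    obtain ⟨hlen', hmem'⟩ := powB_inv q hq (s - 1)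
    unfold powB
    split_ifs with h1 h2
    · have : s = 1 := by omega
      subst this; simp [iterW]
    · rw [applyP_comp _ _ _ (fun j hj => hlen ▸ hmem j hj)]
      rw [ih (s / 2) (by omega) (by omega), ih (s / 2) (by omega) (by omega)]
      rw [← iterW_add]
      congr 1
      omega
    · rw [applyP_comp _ _ _ (fun j hj => hlen' ▸ hq j hj)]
      rw [ih (s - 1) (by omega) (by omega)]
      have : s = (s - 1) + 1 := by omega
      rw [this]
      simp [iterW]

-- getElem of the pair-flattening [a for b in zip(B,C) for a in b]
lemma pairFlat_length (l : List (Int × Int)) :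
    (l.flatMap fun p => [p.1, p.2]).length = 2 * l.length := by
  induction l with
  | nil => simp
  | cons p l ih => simp [ih]; omega

lemma pairFlat_getElem (l : List (Int × Int)) (j : Nat) (h : j < 2 * l.length) :
    (l.flatMap fun p => [p.1, p.2])[j]'(by rw [pairFlat_length]; exact h) =
      if j % 2 = 0 then (l[j / 2]'(by omega)).1 else (l[j / 2]'(by omega)).2 := by
  induction l generalizing j with
  | nil => simp at h
  | cons p l ih =>
    match j with
    | 0 => simp
    | 1 => simp
    | j + 2 =>
      have hj : j < 2 * l.length := by simp at h; omega
      have : (((p :: l).flatMap fun p => [p.1, p.2]))[j + 2]'(by rw [pairFlat_length]; simpa using h)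
          = (l.flatMap fun p => [p.1, p.2])[j]'(by rw [pairFlat_length]; exact hj) := by
        simp [List.flatMap_cons]
      rw [this, ih j hj]
      have h2 : (j + 2) / 2 = j / 2 + 1 := by omega
      have h3 : (j + 2) % 2 = j % 2 := by omega
      simp [h2, h3]

lemma sliceA_eq (d : List Int) :
    sliceA d = (d.take (d.length / 2), d.drop (d.length / 2)) := by
  unfold sliceA
  rw [PySem.List.slice_to_natCast, PySem.List.slice_from_natCast]

lemma sigmaB_out (k : Nat) :
    sigmaB k "out" = (List.range (2 * k)).map (fun j => j / 2 + (j % 2) * k) := by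
  unfold sigmaB; rw [if_pos rfl]

lemma sigmaB_in (k : Nat) :
    sigmaB k "in" = (List.range (2 * k)).map (fun j => j / 2 + (1 - j % 2) * k) := by
  unfold sigmaB; rw [if_neg (by decide)]

lemma weaveA_eq (d : List Int) (t : String) (ht : t = "out" ∨ t = "in") :
    weaveA d t = applyP (sigmaB (d.length / 2) t) d := by
  have hlen2 : 2 * (d.length / 2) ≤ d.length := by omega
  rcases ht with rfl | rfl
  · have h1 : weaveA d "out" =
        ((d.take (d.length / 2)).zip (d.drop (d.length / 2))).flatMap (fun p => [p.1, p.2]) := by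
      simp [weaveA, sliceA_eq]
    have hzlen : ((d.take (d.length / 2)).zip (d.drop (d.length / 2))).length = d.length / 2 := by
      simp; omega
    rw [h1, sigmaB_out]
    apply List.ext_getElem
    · rw [pairFlat_length, hzlen]; simp [applyP]
    · intro j hj hj'
      have hjlt : j < 2 * (d.length / 2) := by rw [pairFlat_length, hzlen] at hj; exact hj
      rw [pairFlat_getElem _ j (by rw [hzlen]; exact hjlt)]
      simp only [applyP, List.getElem_map, List.getElem_range]
      split_ifs with hp
      · rw [List.getElem_zip]
        simp only [List.getElem_take, hp, Nat.zero_mul, Nat.add_zero]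
        rw [List.getD_eq_getElem d 0 (by omega)]
      · have h1' : j % 2 = 1 := by omega
        rw [List.getElem_zip]
        simp only [List.getElem_drop, h1', Nat.one_mul]
        rw [List.getD_eq_getElem d 0 (by omega)]
        congr 1
        omega
  · have h1 : weaveA d "in" =
        ((d.drop (d.length / 2)).zip (d.take (d.length / 2))).flatMap (fun p => [p.1, p.2]) := by
      simp [weaveA, sliceA_eq]
    have hzlen : ((d.drop (d.length / 2)).zip (d.take (d.length / 2))).length = d.length / 2 := by
      simp; omega
    rw [h1, sigmaB_in]
    apply List.ext_getElem
    · rw [pairFlat_length, hzlen]; simp [applyP]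
    · intro j hj hj'
      have hjlt : j < 2 * (d.length / 2) := by rw [pairFlat_length, hzlen] at hj; exact hj
      rw [pairFlat_getElem _ j (by rw [hzlen]; exact hjlt)]
      simp only [applyP, List.getElem_map, List.getElem_range]
      split_ifs with hp
      · rw [List.getElem_zip]
        simp only [List.getElem_drop, hp, Nat.sub_zero, Nat.one_mul]
        rw [List.getD_eq_getElem d 0 (by omega)]
        congr 1
        omega
      · have h1' : j % 2 = 1 := by omega
        rw [List.getElem_zip]
        simp only [List.getElem_take, h1', Nat.sub_self, Nat.zero_mul, Nat.add_zero]
        rw [List.getD_eq_getElem d 0 (by omega)]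

lemma iterW_comm (q : List Nat) (s : Nat) (d : List Int) :
    iterW q s (applyP q d) = applyP q (iterW q s d) := by
  induction s with
  | zero => simp [iterW]
  | succ s ih => simp [iterW, ih]

lemma faroLoopA_eq (t : String) (ht : t = "out" ∨ t = "in") (k : Nat) :
    ∀ s d, d.length = 2 * k → faroLoopA s d t = iterW (sigmaB k t) s d := by
  intro s
  induction s with
  | zero => intro d _; rfl
  | succ s ih =>
    intro d hd
    have hk : d.length / 2 = k := by omega
    have hw : weaveA d t = applyP (sigmaB k t) d := by rw [weaveA_eq d t ht, hk]
    show faroLoopA s (weaveA d t) t = iterW (sigmaB k t) (s + 1) d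
    rw [hw, ih _ (by rw [applyP_length, sigmaB_length k t])]
    rw [iterW_comm]
    rfl

-- ===== VERDICT (by name: the statement is the Claim_ definition above) =====
theorem faro_shuffle_spec : Claim_equal_faro_shuffle := by
  intro d n t _ hpre
  unfold Spec_faro_shuffle faro_shuffle faro_shuffle_alt
  by_cases hn : n ≤ 0
  · rw [if_pos hn]
    have : n.toNat = 0 := by omega
    rw [this]; rfl
  · rw [if_neg hn]
    have hv : t = "out" ∨ t = "in" := by
      rcases hpre with h | h | h
      · omega
      · exact Or.inr h
      · exact Or.inl h
    rw [if_neg (by rcases hv with rfl | rfl <;> simp)]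
    have hs : 1 ≤ n.toNat := by omega
    set k := d.length / 2 with hkdef
    have hq : ∀ i ∈ sigmaB k t, i < (sigmaB k t).length := by
      intro i hi; rw [sigmaB_length k t]; exact sigmaB_mem k t i hi
    have h1 : faroLoopA n.toNat d t = iterW (sigmaB k t) n.toNat d := by
      obtain ⟨s, hs'⟩ : ∃ s, n.toNat = s + 1 := ⟨n.toNat - 1, by omega⟩
      rw [hs']
      show faroLoopA s (weaveA d t) t = iterW (sigmaB k t) (s + 1) d
      rw [weaveA_eq d t hv, ← hkdef,
          faroLoopA_eq t hv k s _ (by rw [applyP_length, sigmaB_length k t]),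
          iterW_comm]
      rfl
    rw [h1, ← powB_correct (sigmaB k t) hq n.toNat hs d]
    rfl
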